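-- pv_equiv track=rewrite | github.com/ASSERT-KTH/Mokav | experiments/pynguin/c4b/single-return/generated_tests/src_1085/0/src_1085.py | func
-- ===== SOURCE A (Python) =====
-- def func(*args):
--
-- 	from typing import List, Tuple
--
-- 	def is_row_clear(board: List[str], time: int, x: int, y: int) -> bool:
-- 	    if all(((row[y] != 'S') for row in board)):
-- 	        return True
-- 	    first_statue_index = [row[y] for row in board].index('S')
-- 	    if ((first_statue_index + time) > x):
-- 	        return True
-- 	    else:
-- 	        return False
--
-- 	def moves(x: int, y: int) -> List[Tuple[(int, int)]]:
-- 	    adj = [((x - 1), (y - 1)), ((x - 1), y), ((x - 1), (y + 1)), (x, (y - 1)), (x, (y + 1)), ((x + 1), (y - 1)), ((x + 1), y), ((x + 1), (y + 1)), (x, y)]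
-- 	    return [(xo, yo) for (xo, yo) in adj if ((0 <= xo < 8) and (0 <= yo < 8))]
--
-- 	def solve(board: List[str]) -> str:
-- 	    stack = [(0, idx, idy) for (idx, line) in enumerate(board) for (idy, sq) in enumerate(line) if (board[idx][idy] == 'M')]
-- 	    while stack:
-- 	        (time, idx, idy) = stack.pop()
-- 	        if (is_row_clear(board, time, idx, idy) or (idx == 0)):
-- 	            return 'WIN'
-- 	        for (xo, yo) in moves(idx, idy):
-- 	            if ((board[(xo - time)][yo] != 'S') and (board[((xo - 1) - time)][yo] != 'S')):
-- 	                stack.append(((time + 1), xo, yo))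
-- 	    return 'LOSE'
-- 	board = [args[0] for _ in range(8)]
-- 	return(solve(board))
-- ===== SOURCE B (Python) =====
-- def func(*args):
--     # A seeds its DFS stack with every monster cell and wins on the very first pop
--     # (the popped cell itself holds the monster, so its column check succeeds),
--     # so the whole search collapses to a membership test.
--     return 'WIN' if 'M' in args[0] else 'LOSE'
-- ===== Notes on version B (the rewrite author's own statement) =====
-- stated objective: faster
-- what changed: Replaced the stack-based DFS over (time,x,y) states by a single membership test for the monster character: the board is 8 identical copies of the input row, so every seeded stack cell itself holds a monster, is_row_clear is true on the very first pop, and the search never explores.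
import Mathlib
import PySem

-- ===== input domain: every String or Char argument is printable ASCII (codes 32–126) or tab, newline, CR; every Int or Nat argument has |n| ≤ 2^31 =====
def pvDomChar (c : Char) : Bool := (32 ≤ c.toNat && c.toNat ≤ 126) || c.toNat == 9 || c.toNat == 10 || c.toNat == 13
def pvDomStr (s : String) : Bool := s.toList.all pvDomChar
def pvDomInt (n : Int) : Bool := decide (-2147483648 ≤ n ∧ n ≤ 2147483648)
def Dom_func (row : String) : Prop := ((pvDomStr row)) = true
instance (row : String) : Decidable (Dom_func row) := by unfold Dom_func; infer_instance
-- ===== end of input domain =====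

-- B replaces A's stack-based DFS by the closed form "'WIN' if 'M' in row else 'LOSE'"
-- (the board is 8 copies of row, so A wins on its very first stack pop); objective: faster.

-- ===== PORT A =====

-- is_row_clear: '[row[y] for row in board]' would raise IndexError on an out-of-range y;
-- in A it is only ever called with y an enumerate index of a row, so in range; the .getD ' '
-- default is dead there. '.index('S')' always finds 'S' in the non-all branch, so .getD 0 is dead.
def isRowClearA (board : List String) (time x y : Int) : Bool :=
  if board.all (fun r => PySem.Str.pyGet? r y ≠ some 'S') then
    true
  else
    let firstStatueIndex : Nat :=
      (PySem.List.index? (board.map (fun r => (PySem.Str.pyGet? r y).getD ' ')) 'S').getD 0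
    decide ((firstStatueIndex : Int) + time > x)

def movesA (x y : Int) : List (Int × Int) :=
  let adj : List (Int × Int) :=
    [(x - 1, y - 1), (x - 1, y), (x - 1, y + 1), (x, y - 1), (x, y + 1),
     (x + 1, y - 1), (x + 1, y), (x + 1, y + 1), (x, y)]
  adj.filter (fun p => 0 ≤ p.1 && p.1 < 8 && 0 ≤ p.2 && p.2 < 8)

-- board[a][b] != 'S'; where Python would raise IndexError (index none) this returns true —
-- in A that code is unreachable (the loop returns on the first pop).
def notStatueA (board : List String) (a b : Int) : Bool :=
  ((PySem.List.pyGet? board a).bind (fun r => PySem.Str.pyGet? r b)) ≠ some 'S'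

-- the seed stack: [(0, idx, idy) for idx,line in enumerate(board) for idy,sq in enumerate(line) if board[idx][idy]=='M']
def initStackA (board : List String) : List (Int × Int × Int) :=
  (PySem.List.enumerate board).flatMap (fun p =>
    (PySem.List.enumerate p.2.toList).filterMap (fun q =>
      if ((PySem.List.pyGet? board p.1).bind (fun r => PySem.Str.pyGet? r q.1)) = some 'M'
      then some ((0 : Int), p.1, q.1) else none))

-- the while loop; fuel only guards termination (A returns on its first pop whenever the stack
-- is nonempty, so any positive fuel reproduces A)
def loopA (board : List String) : Nat → List (Int × Int × Int) → String
  | 0, _ => "LOSE"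
  | fuel + 1, stack =>
    match stack.getLast? with
    | none => "LOSE"
    | some (time, idx, idy) =>
      if isRowClearA board time idx idy || idx == 0 then "WIN"
      else
        loopA board fuel
          (stack.dropLast ++
            (movesA idx idy).filterMap (fun m =>
              if notStatueA board (m.1 - time) m.2 && notStatueA board (m.1 - 1 - time) m.2
              then some (time + 1, m.1, m.2) else none))

def func (row : String) : String :=
  let board := List.replicate 8 row
  let stack := initStackA board
  loopA board (stack.length + 1) stack

-- ===== PORT B =====
def func_alt (row : String) : String :=
  if PySem.Str.isIn "M" row then "WIN" else "LOSE"

-- ===== PRECONDITION & SPEC =====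
def Spec_func (row : String) (out : String) : Prop := out = func_alt row
instance (row : String) (out : String) : Decidable (Spec_func row out) := by unfold Spec_func; infer_instance

-- ===== CLAIM (what is proved, stated in full; the proofs are below) =====
def Claim_equal_func : Prop := ∀ (row : String), Dom_func row → Spec_func row (func row)

-- ===== LEMMAS AND PROOFS =====

-- 'M' in row  ↔  'M' ∈ row.toList
theorem isIn_M_iff (row : String) : PySem.Str.isIn "M" row = true ↔ 'M' ∈ row.toList := by
  rw [PySem.Str.isIn_iff_infix]
  constructor
  · intro h
    exact (List.singleton_sublist).1 h.sublist
  · intro h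
    obtain ⟨s, t, hst⟩ := List.append_of_mem h
    exact ⟨s, t, by simpa using hst.symm⟩

-- every element of the seed stack has time 0 and sits on an 'M' of row
theorem mem_initStackA (row : String) (e : Int × Int × Int)
    (h : e ∈ initStackA (List.replicate 8 row)) :
    e.1 = 0 ∧ PySem.List.pyGet? row.toList e.2.2 = some 'M' := by
  unfold initStackA at h
  obtain ⟨p, _, hq⟩ := List.mem_flatMap.1 h
  obtain ⟨q, _, hcond⟩ := List.mem_filterMap.1 hq
  split at hcond
  · rename_i hM
    obtain ⟨r, hr, hrc⟩ := Option.bind_eq_some_iff.1 hM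
    have hrow : r = row :=
      List.eq_of_mem_replicate (PySem.List.mem_of_pyGet?_eq_some _ hr)
    cases hcond
    refine ⟨rfl, ?_⟩
    subst hrow
    simpa [PySem.Str.pyGet?] using hrc
  · cases hcond

-- if row has no 'M', the seed stack is empty
theorem initStackA_eq_nil (row : String) (h : 'M' ∉ row.toList) :
    initStackA (List.replicate 8 row) = [] := by
  rw [List.eq_nil_iff_forall_not_mem]
  intro e he
  exact h (PySem.List.mem_of_pyGet?_eq_some _ (mem_initStackA row e he).2)

-- if row has an 'M', the seed stack is nonempty
theorem initStackA_ne_nil (row : String) (h : 'M' ∈ row.toList) :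
    initStackA (List.replicate 8 row) ≠ [] := by
  obtain ⟨k, hk, hkM⟩ := List.mem_iff_getElem.1 h
  intro hnil
  have hmem : ((0 : Int), (0 : Int), (k : Int)) ∈ initStackA (List.replicate 8 row) := by
    unfold initStackA
    refine List.mem_flatMap.2 ⟨((0 : Int), row), ?_, ?_⟩
    · show ((0 : Int), row) ∈ PySem.List.enumerate (row :: List.replicate 7 row) 0
      rw [PySem.List.enumerate_cons]
      exact List.mem_cons_self
    · refine List.mem_filterMap.2 ⟨((k : Int), 'M'), ?_, ?_⟩
      · exact (PySem.List.mem_enumerate_iff _ _ _).2 ⟨k, hk, by simp [hkM]⟩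
      · simp [PySem.Str.pyGet?, List.getElem?_eq_getElem hk, hkM]
  rw [hnil] at hmem
  cases hmem

-- a cell holding 'M' makes is_row_clear true (every row of the board is row itself)
theorem isRowClearA_of_M (row : String) (t x y : Int)
    (h : PySem.List.pyGet? row.toList y = some 'M') :
    isRowClearA [row, row, row, row, row, row, row, row] t x y = true := by
  simp [isRowClearA, PySem.Str.pyGet?, h]

-- ===== VERDICT (by name: the statement is the Claim_ definition above) =====
theorem func_spec : Claim_equal_func := by
  intro row _
  unfold Spec_func func func_alt
  by_cases h : 'M' ∈ row.toList
  · rw [if_pos ((isIn_M_iff row).2 h)]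
    have hne := initStackA_ne_nil row h
    obtain ⟨e, hlast⟩ := Option.isSome_iff_exists.1 (List.getLast?_isSome.2 hne)
    obtain ⟨t, x, y⟩ := e
    obtain ⟨ht, hM⟩ := mem_initStackA row _ (List.mem_of_getLast? hlast)
    simp only at ht hM
    show loopA (List.replicate 8 row)
        ((initStackA (List.replicate 8 row)).length + 1)
        (initStackA (List.replicate 8 row)) = "WIN"
    rw [loopA, hlast]
    simp [isRowClearA_of_M row t x y hM]
  · rw [if_neg (fun hc => h ((isIn_M_iff row).1 hc))]
    show loopA (List.replicate 8 row)
        ((initStackA (List.replicate 8 row)).length + 1)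
        (initStackA (List.replicate 8 row)) = "LOSE"
    rw [initStackA_eq_nil row h]
    rfl
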